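-- pv_equiv track=rewrite | github.com/cptlemons/Advent-of-Code | 2017/Day9/d9.py | clean_garbage
-- ===== SOURCE A (Python) =====
-- def clean_garbage(string):
--     garb_list = list(string)
--     clean = []
--     while len(garb_list) > 0:
--         if garb_list[0] != '<':
--             clean += garb_list[0]
--             garb_list = garb_list[1:]
--         else:
--             while garb_list[0] != '>':
--                 if garb_list[0] != '!':
--                     garb_list = garb_list[1:]
--                 else:
--                     garb_list = garb_list[2:]
--             garb_list = garb_list[1:]
--     for char in clean:
--         if char not in ('{','}'):
--             clean.remove(char)
--     return ''.join(clean)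
-- ===== SOURCE B (Python) =====
-- def clean_garbage(string):
--     # Strip garbage in a single state-machine pass instead of repeatedly
--     # re-slicing the character list; then apply the day's brace filter.
--     clean = []
--     in_garbage = False
--     skip = False
--     for c in string:
--         if skip:
--             skip = False
--         elif in_garbage:
--             if c == '!':
--                 skip = True
--             elif c == '>':
--                 in_garbage = False
--         elif c == '<':
--             in_garbage = True
--         else:
--             clean.append(c)
--     for char in clean:
--         if char not in ('{', '}'):
--             clean.remove(char)
--     return ''.join(clean)
-- ===== Notes on version B (the rewrite author's own statement) =====
-- stated objective: faster
-- what changed: Replaces A's quadratic garbage stripping (garb_list = garb_list[1:] re-slicing the whole list for every character) with a single state-machine pass over the string; the final brace filter loop is kept as in A. Pre_ excludes inputs with an unterminated garbage section, on which A raises IndexError.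
import Mathlib
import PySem

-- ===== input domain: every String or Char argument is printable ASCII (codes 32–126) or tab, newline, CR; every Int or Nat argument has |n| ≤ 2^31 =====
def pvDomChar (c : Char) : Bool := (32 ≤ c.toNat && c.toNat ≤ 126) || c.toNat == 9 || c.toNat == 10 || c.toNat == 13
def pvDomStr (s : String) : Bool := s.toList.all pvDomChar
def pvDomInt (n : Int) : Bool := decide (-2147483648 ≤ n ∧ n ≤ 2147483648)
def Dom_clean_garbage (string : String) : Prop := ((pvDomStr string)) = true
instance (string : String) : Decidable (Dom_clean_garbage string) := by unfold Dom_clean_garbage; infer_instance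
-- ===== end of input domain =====

-- B replaces A's quadratic slice-and-reslice garbage stripping by a single state-machine
-- pass; the final brace filter is the same loop in both programs. Equivalence is proved
-- on inputs where A does not raise IndexError (Pre_ below).

-- ===== PORT A =====

-- inner `while garb_list[0] != '>'` loop of A plus the final `garb_list[1:]`:
-- given the current list (starting at the '<'), returns the list after the garbage section.
-- When the list runs out Python evaluates garb_list[0] on [] and raises IndexError; those
-- inputs are excluded by Pre_ below (here the empty list is just returned).
def pvGarbA : List Char → List Char
  | [] => []                                   -- A raises IndexError here
  | c :: t =>
    if c ≠ '>' then
      if c ≠ '!' then pvGarbA t                -- garb_list = garb_list[1:]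
      else                                     -- garb_list = garb_list[2:]
        match t with
        | [] => []                             -- then garb_list[0] raises (excluded by Pre_)
        | _ :: u => pvGarbA u
    else t                                     -- exit while, garb_list = garb_list[1:]

-- outer `while len(garb_list) > 0` loop of A, accumulating `clean`; the fuel argument
-- only makes the recursion structural: each step strictly shortens the list, and the
-- function is always called with fuel = length of the list, so fuel never runs out.
def pvStripA : Nat → List Char → List Char
  | _, [] => []
  | 0, _ :: _ => []                            -- never reached (fuel ≥ length)
  | fuel + 1, c :: t =>
    if c ≠ '<' then c :: pvStripA fuel t
    else pvStripA fuel (pvGarbA (c :: t))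

-- `for char in clean: if char not in ('{','}'): clean.remove(char)` — CPython's for
-- loop over a mutating list, modelled by the internal index i; clean.remove is the
-- first-occurrence removal PySem.List.remove? (char = clean[i] is present, so never None).
-- fuel = L.length + 1 always suffices: L.length - i drops every iteration.
-- This loop appears verbatim in both Pythons, so both ports use this helper.
def pvRemoveA : Nat → List Char → Nat → List Char
  | 0, L, _ => L                               -- never reached
  | fuel + 1, L, i =>
    if h : i < L.length then
      let ch := L[i]
      if ch ≠ '{' ∧ ch ≠ '}' then
        match PySem.List.remove? L ch with
        | some L' => pvRemoveA fuel L' (i + 1)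
        | none => L                            -- unreachable: ch ∈ L
      else pvRemoveA fuel L (i + 1)
    else L

def clean_garbage (string : String) : String :=
  let clean := pvStripA string.toList.length string.toList
  String.ofList (pvRemoveA (clean.length + 1) clean 0)

-- ===== PORT B =====

-- Source B's first for-loop: state machine (in_garbage, skip) over the characters
def pvStripB : Bool → Bool → List Char → List Char
  | _, _, [] => []
  | inG, skip, c :: t =>
    if skip then pvStripB inG false t
    else if inG then
      if c = '!' then pvStripB inG true t
      else if c = '>' then pvStripB false false t
      else pvStripB inG false t
    else if c = '<' then pvStripB true false t
    else c :: pvStripB inG false t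

def clean_garbage_alt (string : String) : String :=
  let clean := pvStripB false false string.toList
  String.ofList (pvRemoveA (clean.length + 1) clean 0)

-- ===== PRECONDITION & SPEC =====

-- Pre_ excludes exactly the inputs on which A raises IndexError: a '<' (outside garbage)
-- whose garbage section never ends with an unescaped '>' before the string runs out.
-- pvOkScan is the membership test of the regular grammar 'sequence of non-'<' characters
-- and closed garbage sections <(!any | other)*>' — a shape condition on the string (the
-- flag says whether the position is inside a garbage section); it computes no output of
-- either program.
def pvOkScan : Bool → List Char → Bool
  | false, [] => true
  | true, [] => false
  | false, c :: t => if c = '<' then pvOkScan true t else pvOkScan false t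
  | true, c :: t =>
    if c = '>' then pvOkScan false t
    else if c = '!' then
      match t with
      | [] => false
      | _ :: u => pvOkScan true u
    else pvOkScan true t

def Pre_clean_garbage (string : String) : Prop := pvOkScan false string.toList = true
instance (string : String) : Decidable (Pre_clean_garbage string) := by
  unfold Pre_clean_garbage; infer_instance

def pvWitness_clean_garbage : String := "{<a>}"

def Spec_clean_garbage (string : String) (out : String) : Prop := out = clean_garbage_alt string
instance (string : String) (out : String) : Decidable (Spec_clean_garbage string out) := by
  unfold Spec_clean_garbage; infer_instance

-- ===== CLAIM (what is proved, stated in full; the proofs are below) =====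
def Claim_equal_clean_garbage : Prop := ∀ (string : String), Dom_clean_garbage string → Pre_clean_garbage string → Spec_clean_garbage string (clean_garbage string)

-- ===== LEMMAS AND PROOFS =====

theorem pvGarbA_eq_of_ne {c : Char} (t : List Char) (h1 : c ≠ '>') (h2 : c ≠ '!') :
    pvGarbA (c :: t) = pvGarbA t := by
  rw [pvGarbA.eq_def]; simp [h1, h2]

theorem pvGarbA_eq_escape {c : Char} (d : Char) (u : List Char) (h2 : c = '!') :
    pvGarbA (c :: d :: u) = pvGarbA u := by
  subst h2; rw [pvGarbA.eq_def]; simp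

theorem pvGarbA_eq_close {c : Char} (t : List Char) (h1 : c = '>') :
    pvGarbA (c :: t) = t := by
  subst h1; rw [pvGarbA.eq_def]; simp

theorem pvGarbA_length_le (l : List Char) : (pvGarbA l).length ≤ l.length := by
  induction l using pvGarbA.induct with
  | case1 => simp [pvGarbA]
  | case2 c t h1 h2 ih =>
      rw [pvGarbA_eq_of_ne t h1 h2]
      exact Nat.le_trans ih (Nat.le_succ _)
  | case3 c h1 h2 =>
      simp only [ne_eq, Decidable.not_not] at h2
      subst h2
      rw [pvGarbA.eq_def]; simp
  | case4 c h1 h2 d u ih =>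
      simp only [ne_eq, Decidable.not_not] at h2
      rw [pvGarbA_eq_escape d u h2]
      simp only [List.length_cons]
      omega
  | case5 c t h1 =>
      simp only [ne_eq, Decidable.not_not] at h1
      rw [pvGarbA_eq_close t h1]
      simp

-- garbage sections: pvGarbA jumps to what pvStripB reaches when it leaves garbage mode
theorem pv_garb_eq (l : List Char) (h : pvOkScan true l = true) :
    pvOkScan false (pvGarbA l) = true ∧ pvStripB true false l = pvStripB false false (pvGarbA l) := by
  induction l using pvGarbA.induct with
  | case1 => rw [pvOkScan.eq_def] at h; simp at h
  | case2 c t h1 h2 ih =>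
      rw [pvOkScan.eq_def] at h
      simp only [if_neg h1, if_neg h2] at h
      obtain ⟨hok, hstr⟩ := ih h
      rw [pvGarbA_eq_of_ne t h1 h2]
      refine ⟨hok, ?_⟩
      rw [← hstr]
      rw [pvStripB.eq_def]
      simp [h2, h1]
  | case3 c h1 h2 =>
      simp only [ne_eq, Decidable.not_not] at h2
      subst h2
      rw [pvOkScan.eq_def] at h
      simp at h
  | case4 c h1 h2 d u ih =>
      simp only [ne_eq, Decidable.not_not] at h2
      subst h2
      rw [pvOkScan.eq_def] at h
      simp only [if_neg (by decide : ¬ ('!' : Char) = '>')] at h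
      obtain ⟨hok, hstr⟩ := ih h
      rw [pvGarbA_eq_escape d u rfl]
      refine ⟨hok, ?_⟩
      rw [← hstr]
      rw [pvStripB.eq_def]
      simp only [if_neg (Bool.false_ne_true)]
      rw [pvStripB.eq_def]
      simp
  | case5 c t h1 =>
      simp only [ne_eq, Decidable.not_not] at h1
      subst h1
      rw [pvOkScan.eq_def] at h
      simp at h
      rw [pvGarbA_eq_close t rfl]
      refine ⟨h, ?_⟩
      rw [pvStripB.eq_def]
      simp

-- stripping: A's slice loop equals B's state machine on well-formed input
theorem pv_strip_eq (fuel : Nat) (l : List Char) (hf : l.length ≤ fuel)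
    (h : pvOkScan false l = true) : pvStripA fuel l = pvStripB false false l := by
  induction fuel generalizing l with
  | zero =>
      cases l with
      | nil => simp [pvStripA, pvStripB]
      | cons c t => simp at hf
  | succ f ih =>
      cases l with
      | nil => simp [pvStripA, pvStripB]
      | cons c t =>
          simp only [List.length_cons, Nat.succ_le_succ_iff] at hf
          by_cases h1 : c = '<'
          · subst h1
            rw [pvOkScan.eq_def] at h
            simp at h
            have hga : pvGarbA ('<' :: t) = pvGarbA t := pvGarbA_eq_of_ne t (by decide) (by decide)
            obtain ⟨hok, hstr⟩ := pv_garb_eq t h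
            rw [pvStripA, if_neg (by simp), hga]
            rw [ih (pvGarbA t) (Nat.le_trans (pvGarbA_length_le t) hf) hok]
            have : pvStripB false false ('<' :: t) = pvStripB true false t := by
              simp [pvStripB]
            rw [this]
            exact hstr.symm
          · rw [pvOkScan.eq_def] at h
            simp only [if_neg h1] at h
            simp [pvStripA, pvStripB, h1, ih t hf h]

-- ===== VERDICT (by name: the statement is the Claim_ definition above) =====
theorem clean_garbage_spec : Claim_equal_clean_garbage := by
  intro s _ hpre
  unfold Spec_clean_garbage clean_garbage clean_garbage_alt
  rw [pv_strip_eq s.toList.length s.toList (Nat.le_refl _) hpre]
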